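-- pv_equiv track=rewrite | github.com/anirban-s/advent-of-code-2020 | day6/day6.py | get_common_len
-- ===== SOURCE A (Python) =====
-- def get_common_len(arr):
-- 	i = 1
-- 	set1 = set(arr[0])
-- 	while i < len(arr):
-- 		set2 = set(arr[i])
-- 		set1 = set1.intersection(set2)
-- 		i += 1
-- 	return len(set1)
-- ===== SOURCE B (Python) =====
-- def get_common_len(arr):
-- 	tally = {}
-- 	for s in arr:
-- 		for c in set(s):
-- 			tally[c] = tally.get(c, 0) + 1
-- 	count = 0
-- 	for v in tally.values():
-- 		if v == len(arr):
-- 			count += 1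
-- 	return count
-- ===== Notes on version B (the rewrite author's own statement) =====
-- stated objective: alternative
-- what changed: B replaces A's progressively shrinking set intersection with a single frequency table (dict tally of per-string distinct characters) and returns the number of characters whose tally equals len(arr).
import Mathlib
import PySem

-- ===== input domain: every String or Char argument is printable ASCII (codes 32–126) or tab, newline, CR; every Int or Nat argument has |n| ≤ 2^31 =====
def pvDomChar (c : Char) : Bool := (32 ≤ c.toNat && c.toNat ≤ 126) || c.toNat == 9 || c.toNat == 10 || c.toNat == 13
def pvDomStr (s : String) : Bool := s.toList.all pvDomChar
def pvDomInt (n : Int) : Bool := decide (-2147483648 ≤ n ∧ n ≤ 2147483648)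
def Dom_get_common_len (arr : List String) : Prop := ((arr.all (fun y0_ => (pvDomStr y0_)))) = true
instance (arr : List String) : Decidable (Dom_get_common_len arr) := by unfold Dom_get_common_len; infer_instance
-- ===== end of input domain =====

-- B keeps a frequency table over every string's distinct characters instead of A's running
-- set intersection; same return value wherever A returns (alternative decomposition, no speed claim).

-- ===== PORT A =====
def get_common_len (arr : List String) : Int :=
  -- i = 1; set1 = set(arr[0]); while i < len(arr): set1 = set1 & set(arr[i]); i += 1; return len(set1)
  match PySem.List.pyGet? arr 0 with
  | none => 0  -- IndexError on empty arr; excluded by Pre_get_common_len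
  | some s0 =>
    let set1 : PySem.Set Char := PySem.Set.ofList s0.toList
    let final := (PySem.List.pyRange 1 (arr.length : Int)).foldl
      (fun set1 i =>
        let set2 : PySem.Set Char := PySem.Set.ofList (PySem.List.pyGetD arr i "").toList
        PySem.Set.inter set1 set2) set1
    PySem.Set.len final

-- ===== PORT B =====
def get_common_len_alt (arr : List String) : Int :=
  let tally : PySem.Dict Char Int :=
    arr.foldl (fun d s =>
      (PySem.Set.ofList s.toList).foldl (fun d c => d.insert c (d.getD c 0 + 1)) d)
      PySem.Dict.empty
  tally.values.foldl (fun count v => if v == (arr.length : Int) then count + 1 else count) 0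

-- ===== PRECONDITION & SPEC =====
-- Pre_ excludes only the empty list, on which A raises IndexError at arr[0].
def Pre_get_common_len (arr : List String) : Prop := 0 < arr.length
instance (arr : List String) : Decidable (Pre_get_common_len arr) := by unfold Pre_get_common_len; infer_instance
def pvWitness_get_common_len : List String := ["abc", "bcd"]

def Spec_get_common_len (arr : List String) (out : Int) : Prop := out = get_common_len_alt arr
instance (arr : List String) (out : Int) : Decidable (Spec_get_common_len arr out) := by unfold Spec_get_common_len; infer_instance

-- ===== CLAIM (what is proved, stated in full; the proofs are below) =====
def Claim_equal_get_common_len : Prop := ∀ (arr : List String), Dom_get_common_len arr → Pre_get_common_len arr → Spec_get_common_len arr (get_common_len arr)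

-- ===== LEMMAS AND PROOFS =====

-- all distinct-per-string characters, concatenated across the strings
def pvBig (arr : List String) : List Char := arr.flatMap (fun s => PySem.Set.ofList s.toList)

lemma pv_count_big (arr : List String) (c : Char) :
    (pvBig arr).count c = arr.countP (fun s => decide (c ∈ s.toList)) := by
  induction arr with
  | nil => simp [pvBig]
  | cons s rest ih =>
    simp only [pvBig, List.flatMap_cons, List.count_append, List.countP_cons] at *
    rw [ih]
    by_cases h : c ∈ s.toList
    · simp [h]
      omega
    · have h0 : (PySem.Set.ofList s.toList).count c = 0 := by
        simp [List.count_eq_zero, PySem.Set.mem_ofList, h]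
      simp [h, h0]

lemma pv_interFold (rest : List String) : ∀ (init : PySem.Set Char), init.Nodup →
    (rest.foldl (fun s1 s => PySem.Set.inter s1 (PySem.Set.ofList s.toList)) init).Nodup ∧
    ∀ c, (c ∈ rest.foldl (fun s1 s => PySem.Set.inter s1 (PySem.Set.ofList s.toList)) init ↔
      c ∈ init ∧ ∀ s ∈ rest, c ∈ s.toList) := by
  induction rest with
  | nil => intro init h; simpa using h
  | cons s rest ih =>
    intro init h
    have h2 : (PySem.Set.inter init (PySem.Set.ofList s.toList)).Nodup :=
      PySem.Set.nodup_inter _ _ h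
    obtain ⟨hn, hm⟩ := ih _ h2
    simp only [List.foldl_cons]
    refine ⟨hn, fun c => ?_⟩
    rw [hm c, PySem.Set.mem_inter]
    simp only [PySem.Set.mem_ofList, List.mem_cons]
    constructor
    · rintro ⟨⟨hc, hs⟩, hall⟩
      exact ⟨hc, by rintro t (rfl | ht); exact hs; exact hall t ht⟩
    · rintro ⟨hc, hall⟩
      exact ⟨⟨hc, hall s (Or.inl rfl)⟩, fun t ht => hall t (Or.inr ht)⟩

lemma pv_alt_eq_countP (arr : List String) :
    get_common_len_alt arr =
      ((PySem.Set.ofList (pvBig arr)).countP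
        (fun c => (((pvBig arr).count c : Int) == (arr.length : Int))) : Int) := by
  unfold get_common_len_alt
  have htally : arr.foldl (fun d s =>
      (PySem.Set.ofList s.toList).foldl (fun d c => d.insert c (d.getD c 0 + 1)) d)
      PySem.Dict.empty = PySem.Dict.counter (pvBig arr) := by
    rw [← PySem.Dict.foldl_insert_getD_add_one_eq_counter]
    simp [pvBig, List.flatMap_def, List.foldl_flatten, List.foldl_map]
  simp only [htally]
  rw [PySem.Dict.values_eq_map_keys _ (PySem.Dict.nodup_keys_counter _) 0]
  rw [List.foldl_map]
  rw [PySem.List.foldl_if_add_one (fun k => ((PySem.Dict.counter (pvBig arr)).getD k 0 == (arr.length : Int)))]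
  simp [PySem.Dict.keys_counter, PySem.Dict.getD_counter]

theorem get_common_len_spec : Claim_equal_get_common_len := by
  intro arr _ hpre
  unfold Spec_get_common_len
  obtain ⟨s0, rest, rfl⟩ : ∃ s0 rest, arr = s0 :: rest := by
    cases arr with
    | nil => simp [Pre_get_common_len] at hpre
    | cons a l => exact ⟨a, l, rfl⟩
  rw [pv_alt_eq_countP]
  unfold get_common_len
  rw [PySem.List.pyGet?_zero_cons]
  simp only []
  rw [show (List.foldl (fun set1 i => PySem.Set.inter set1 (PySem.Set.ofList (PySem.List.pyGetD (s0 :: rest) i "").toList))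
        (PySem.Set.ofList s0.toList) (PySem.List.pyRange 1 ((s0 :: rest).length : Int)))
      = (List.foldl (fun acc j => (fun acc s => PySem.Set.inter acc (PySem.Set.ofList s.toList)) acc (PySem.List.pyGetD (s0 :: rest) j ""))
        (PySem.Set.ofList s0.toList) (PySem.List.pyRange 1 ((s0 :: rest).length : Int))) from rfl,
     PySem.List.foldl_pyRange_pyGetD' (s0 :: rest) "" (fun acc s => PySem.Set.inter acc (PySem.Set.ofList s.toList)) (PySem.Set.ofList s0.toList) (by norm_num : (0:Int) ≤ 1)]
  have hdrop : List.drop (1:Int).toNat (s0 :: rest) = rest := rfl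
  rw [hdrop]
  obtain ⟨hn, hm⟩ := pv_interFold rest (PySem.Set.ofList s0.toList) (PySem.Set.nodup_ofList _)
  set res := rest.foldl (fun s1 s => PySem.Set.inter s1 (PySem.Set.ofList s.toList))
      (PySem.Set.ofList s0.toList) with hres
  set p : Char → Bool :=
    fun c => (((pvBig (s0 :: rest)).count c : Int) == ((s0 :: rest).length : Int)) with hp
  have hperm : res.Perm ((PySem.Set.ofList (pvBig (s0 :: rest))).filter p) := by
    rw [List.perm_ext_iff_of_nodup hn ((PySem.Set.nodup_ofList _).filter _)]
    intro c
    rw [hm c]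
    simp only [List.mem_filter, PySem.Set.mem_ofList, hp, beq_iff_eq, Nat.cast_inj,
      pv_count_big]
    constructor
    · rintro ⟨hc0, hall⟩
      have hcmem : c ∈ pvBig (s0 :: rest) := by
        simp only [pvBig, List.mem_flatMap]
        exact ⟨s0, List.mem_cons_self, by simpa [PySem.Set.mem_ofList] using
          (by simpa [PySem.Set.mem_ofList] using hc0 : c ∈ s0.toList)⟩
      refine ⟨hcmem, ?_⟩
      rw [List.countP_eq_length]
      intro s hs
      rcases List.mem_cons.1 hs with rfl | hs
      · simpa using (by simpa [PySem.Set.mem_ofList] using hc0 : c ∈ s.toList)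
      · simpa using hall s hs
    · rintro ⟨_, hcount⟩
      have hall : ∀ s ∈ (s0 :: rest), c ∈ s.toList := by
        have := List.countP_eq_length.1 hcount
        intro s hs
        simpa using this s hs
      exact ⟨by simpa [PySem.Set.mem_ofList] using hall s0 List.mem_cons_self,
        fun s hs => hall s (List.mem_cons_of_mem _ hs)⟩
  have hlen : res.length = ((PySem.Set.ofList (pvBig (s0 :: rest))).filter p).length :=
    hperm.length_eq
  simp only [PySem.Set.len, hlen, List.countP_eq_length_filter]
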